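-- pv_equiv track=rewrite | github.com/logpai/logparser | logparser/HCM_Parser/test.py | getCommonTemplate
-- ===== SOURCE A (Python) =====
-- def getCommonTemplate(lcs, seq):
--         retVal = []
--         if not lcs:
--             return retVal
--
--         # 因为在 seq 中从左到右进行匹配，而 lcs 是按从后向前回溯生成的，需要反转顺序以便匹配。
--         lcs = lcs[::-1]
--         i = 0
--         # 如果当前 token 等于 lcs 的最后一个元素（lcs[-1]），将其加入模板，并从 lcs 中移除该元素。
--         # 如果不匹配，添加占位符 <*>。
--         for token in seq:
--             i += 1
--             if token == lcs[-1]: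
--                 retVal.append(token)
--                 lcs.pop()
--             else:
--                 retVal.append("<*>")
--             if not lcs:
--                 break
--         if i < len(seq):
--             retVal.append("<*>")
--         return "".join(compress_repeated_delimiters(retVal))
--
-- def compress_repeated_delimiters(lcs):
--         """
--         合并连续相同的字符（例如多个 '/' 合并为一个 '/'）
--         """
--         if not lcs:
--             return []
--
--         compressed = [lcs[0]]  # 初始化结果数组，包含第一个元素
--         for i in range(1, len(lcs)):
--             # 如果当前字符和前一个字符不同，添加到结果中
--             if lcs[i] != lcs[i - 1]:
--                 compressed.append(lcs[i])
--         return compressed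
-- ===== SOURCE B (Python) =====
-- def getCommonTemplate(lcs, seq):
--     # Single fused pass: a forward pointer into lcs, emitting token or "<*>"
--     # and deduplicating adjacent equal emissions on the fly.
--     if not lcs:
--         return []
--     out = []
--     j = 0
--     k = 0
--     while k < len(seq) and j < len(lcs):
--         token = seq[k]
--         if token == lcs[j]:
--             ch = token
--             j += 1
--         else:
--             ch = "<*>"
--         if not out or out[-1] != ch:
--             out.append(ch)
--         k += 1
--     if k < len(seq) and out[-1] != "<*>":
--         out.append("<*>")
--     return "".join(out)
-- ===== Notes on version B (the rewrite author's own statement) =====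
-- stated objective: simpler
-- what changed: B consumes lcs with a forward index instead of A's reverse-and-pop, and fuses the separate compress_repeated_delimiters pass into the emitting loop by dedup-checking each emission against the last appended element, so the intermediate uncompressed list and the second pass disappear.
-- outside the precondition, e.g. on getCommonTemplate([], ['a', 'b']): A returns [], B returns []
import Mathlib
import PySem

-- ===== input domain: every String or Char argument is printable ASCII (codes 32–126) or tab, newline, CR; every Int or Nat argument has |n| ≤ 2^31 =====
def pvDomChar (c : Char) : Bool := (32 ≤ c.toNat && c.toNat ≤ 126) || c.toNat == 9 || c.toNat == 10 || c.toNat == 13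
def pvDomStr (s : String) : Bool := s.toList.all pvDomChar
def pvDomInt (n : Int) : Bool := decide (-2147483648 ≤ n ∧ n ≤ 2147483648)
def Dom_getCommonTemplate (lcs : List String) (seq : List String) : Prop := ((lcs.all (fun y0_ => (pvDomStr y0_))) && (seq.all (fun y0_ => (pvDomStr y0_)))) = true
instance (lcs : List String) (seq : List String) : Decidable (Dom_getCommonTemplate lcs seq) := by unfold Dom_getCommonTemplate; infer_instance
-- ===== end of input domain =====

-- B fuses A's separate compress pass into the emitting loop and consumes lcs with a
-- forward index instead of reverse-and-pop (objective: simpler; same O(n) cost).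

-- ===== PORT A =====

-- compress_repeated_delimiters: loop over indices 1..len-1 comparing lcs[i] with lcs[i-1]
def pvCompressAux (prev : String) : List String → List String
  | [] => []
  | y :: rest => if y ≠ prev then y :: pvCompressAux y rest else pvCompressAux y rest

def compressRepeatedDelimiters (l : List String) : List String :=
  match l with
  | [] => []
  | x :: rest => x :: pvCompressAux x rest

-- the for-loop of A: state (reversed lcs, retVal accumulator, counter i), with break
def pvALoop : List String → List String → List String → Nat → (List String × Nat)
  | [], _lcsR, acc, i => (acc, i)
  | t :: rest, lcsR, acc, i =>
    let i' := i + 1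
    match lcsR.getLast? with
    | none => (acc, i')  -- lcs[-1] on empty list: unreachable (loop breaks when lcs empties)
    | some a =>
      if t = a then
        let acc' := acc ++ [t]
        let lcsR' := lcsR.dropLast
        if lcsR' = [] then (acc', i') else pvALoop rest lcsR' acc' i'
      else
        let acc' := acc ++ ["<*>"]
        if lcsR = [] then (acc', i') else pvALoop rest lcsR acc' i'

def getCommonTemplate (lcs : List String) (seq : List String) : String :=
  if lcs = [] then ""  -- Python returns the empty LIST here (not a string); outside Pre_
  else
    let p := pvALoop seq lcs.reverse [] 0  -- lcs[::-1]
    let retVal := if p.2 < seq.length then p.1 ++ ["<*>"] else p.1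
    String.join (compressRepeatedDelimiters retVal)  -- "".join(...)

-- ===== PORT B =====

-- `if not out or out[-1] != ch: out.append(ch)` — getLast? = none covers `not out`
def pvDstep (out : List String) (ch : String) : List String :=
  if out.getLast? ≠ some ch then out ++ [ch] else out

-- the while-loop of B: state (j pointer into lcs, out, k), stops when seq or lcs exhausted
def pvBLoop (lcs : List String) : List String → Nat → List String → Nat → (List String × Nat)
  | [], _j, out, k => (out, k)
  | t :: rest, j, out, k =>
    if j < lcs.length then
      let ch := if t = lcs.getD j "" then t else "<*>"
      let j' := if t = lcs.getD j "" then j + 1 else j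
      pvBLoop lcs rest j' (pvDstep out ch) (k + 1)
    else (out, k)

def getCommonTemplate_alt (lcs : List String) (seq : List String) : String :=
  if lcs = [] then ""  -- Python B returns the empty list here; outside Pre_
  else
    let p := pvBLoop lcs seq 0 [] 0
    let out := if p.2 < seq.length ∧ p.1.getLast? ≠ some "<*>" then p.1 ++ ["<*>"] else p.1
    String.join out

-- ===== PRECONDITION & SPEC =====
-- Pre_ excludes empty lcs, on which both Pythons return the empty LIST rather than a
-- value of the declared String return type.
def Pre_getCommonTemplate (lcs : List String) (seq : List String) : Prop := lcs ≠ []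
instance (lcs : List String) (seq : List String) : Decidable (Pre_getCommonTemplate lcs seq) := by unfold Pre_getCommonTemplate; infer_instance
def pvWitness_getCommonTemplate : List String × List String := (["a", "/"], ["a", "b", "/", "/"])

def Spec_getCommonTemplate (lcs : List String) (seq : List String) (out : String) : Prop := out = getCommonTemplate_alt lcs seq
instance (lcs : List String) (seq : List String) (out : String) : Decidable (Spec_getCommonTemplate lcs seq out) := by unfold Spec_getCommonTemplate; infer_instance

-- ===== CLAIM (what is proved, stated in full; the proofs are below) =====
def Claim_equal_getCommonTemplate : Prop := ∀ (lcs : List String) (seq : List String), Dom_getCommonTemplate lcs seq → Pre_getCommonTemplate lcs seq → Spec_getCommonTemplate lcs seq (getCommonTemplate lcs seq)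

-- ===== LEMMAS AND PROOFS =====

-- common emission: the sequence of characters both loops emit, plus the number of
-- seq tokens consumed; lcs is consumed front-to-back
def pvEmit : List String → List String → (List String × Nat)
  | _, [] => ([], 0)
  | [], _ :: _ => ([], 0)
  | a :: l', t :: rest =>
    if t = a then
      if l' = [] then ([t], 1)
      else
        let p := pvEmit l' rest
        (t :: p.1, p.2 + 1)
    else
      let p := pvEmit (a :: l') rest
      ("<*>" :: p.1, p.2 + 1)
  termination_by l seq => seq.length

theorem pvALoop_emit (seq : List String) : ∀ (l acc : List String) (i : Nat), l ≠ [] →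
    pvALoop seq l.reverse acc i = (acc ++ (pvEmit l seq).1, i + (pvEmit l seq).2) := by
  induction seq with
  | nil => intro l acc i hl; cases l with
    | nil => exact absurd rfl hl
    | cons a l' => simp [pvALoop, pvEmit]
  | cons t rest ih =>
    intro l acc i hl
    cases l with
    | nil => exact absurd rfl hl
    | cons a l' =>
      have hlast : (a :: l').reverse.getLast? = some a := by
        simp [List.getLast?_reverse]
      have hdrop : (a :: l').reverse.dropLast = l'.reverse := by
        simp [List.reverse_cons]
      by_cases ht : t = a
      · by_cases hl' : l' = []
        · subst hl'; simp [pvALoop, ht, pvEmit]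
        · have hrev : l'.reverse ≠ [] := by simpa using hl'
          simp only [pvALoop, hlast, hdrop, if_pos ht, if_neg hrev]
          rw [ih l' (acc ++ [t]) (i + 1) hl']
          simp [pvEmit, ht, hl']
          omega
      · have hne : (a :: l').reverse ≠ [] := by simp
        simp only [pvALoop, hlast, if_neg ht, if_neg hne]
        rw [ih (a :: l') (acc ++ ["<*>"]) (i + 1) (by simp)]
        simp [pvEmit, ht]
        omega

theorem pvEmit_cons (a : String) (l' : List String) (t : String) (rest : List String) :
    pvEmit (a :: l') (t :: rest) =
      if t = a then
        (if l' = [] then ([t], 1)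
         else (t :: (pvEmit l' rest).1, (pvEmit l' rest).2 + 1))
      else ("<*>" :: (pvEmit (a :: l') rest).1, (pvEmit (a :: l') rest).2 + 1) := by
  rw [pvEmit]

theorem pvEmit_nil_fst (seq : List String) : pvEmit [] seq = ([], 0) := by
  cases seq <;> rw [pvEmit]

theorem pvBLoop_emit (seq : List String) : ∀ (lcs : List String) (j : Nat) (out : List String) (k : Nat),
    j ≤ lcs.length →
    pvBLoop lcs seq j out k = ((pvEmit (lcs.drop j) seq).1.foldl pvDstep out, k + (pvEmit (lcs.drop j) seq).2) := by
  induction seq with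
  | nil => intro lcs j out k _; cases h : lcs.drop j <;> simp [pvBLoop, pvEmit]
  | cons t rest ih =>
    intro lcs j out k hj
    rcases lt_or_eq_of_le hj with hlt | heq
    · have hdrop : lcs.drop j = lcs[j] :: lcs.drop (j + 1) := by
        exact (List.getElem_cons_drop hlt).symm
      have hgetD : lcs.getD j "" = lcs[j] := by
        simp [List.getD, hlt]
      by_cases ht : t = lcs[j]
      · by_cases hend : lcs.drop (j + 1) = []
        · have hlen : j + 1 = lcs.length := by
            have := List.drop_eq_nil_iff.mp hend
            omega
          simp only [pvBLoop, if_pos hlt, hgetD, if_pos ht]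
          rw [ih lcs (j + 1) (pvDstep out t) (k + 1) (le_of_eq hlen)]
          rw [hdrop, pvEmit_cons]
          simp [ht, hend, pvEmit_nil_fst]
        · simp only [pvBLoop, if_pos hlt, hgetD, if_pos ht]
          rw [ih lcs (j + 1) (pvDstep out t) (k + 1) (by omega)]
          rw [hdrop, pvEmit_cons]
          simp [ht, hend]
          omega
      · simp only [pvBLoop, if_pos hlt, hgetD, if_neg ht]
        rw [ih lcs j (pvDstep out "<*>") (k + 1) hj]
        rw [hdrop, pvEmit_cons]
        simp [ht, ← hdrop]
        omega
    · have hdrop : lcs.drop j = [] := by simp [heq]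
      simp [pvBLoop, heq, pvEmit_nil_fst]

theorem foldl_dstep_compressAux : ∀ (rest out : List String) (p : String),
    out.getLast? = some p → rest.foldl pvDstep out = out ++ pvCompressAux p rest := by
  intro rest
  induction rest with
  | nil => intro out p _; simp [pvCompressAux]
  | cons y rest ih =>
    intro out p hp
    by_cases hy : y = p
    · subst hy
      have : pvDstep out y = out := by simp [pvDstep, hp]
      simp only [List.foldl_cons, this]
      rw [ih out y hp]
      simp [pvCompressAux]
    · have : pvDstep out y = out ++ [y] := by
        simp [pvDstep, hp]
        exact fun h => absurd h.symm hy
      simp only [List.foldl_cons, this]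
      rw [ih (out ++ [y]) y (by simp)]
      simp [pvCompressAux, hy]
    
theorem compress_eq_foldl (l : List String) : compressRepeatedDelimiters l = l.foldl pvDstep [] := by
  cases l with
  | nil => simp [compressRepeatedDelimiters]
  | cons x rest =>
    have h1 : pvDstep [] x = [x] := by simp [pvDstep]
    simp only [List.foldl_cons, h1]
    rw [foldl_dstep_compressAux rest [x] x (by simp)]
    simp [compressRepeatedDelimiters]

-- ===== VERDICT (by name: the statement is the Claim_ definition above) =====
theorem getCommonTemplate_spec : Claim_equal_getCommonTemplate := by
  intro lcs seq _ hpre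
  unfold Spec_getCommonTemplate getCommonTemplate getCommonTemplate_alt
  have hl : lcs ≠ [] := hpre
  rw [if_neg hl, if_neg hl]
  rw [pvALoop_emit seq lcs [] 0 hl]
  rw [pvBLoop_emit seq lcs 0 [] 0 (Nat.zero_le _)]
  simp only [List.drop_zero, List.nil_append, Nat.zero_add]
  rw [compress_eq_foldl]
  by_cases hk : (pvEmit lcs seq).2 < seq.length
  · rw [if_pos hk]
    rw [List.foldl_append]
    by_cases hstar : ((pvEmit lcs seq).1.foldl pvDstep []).getLast? ≠ some "<*>"
    · rw [if_pos ⟨hk, hstar⟩]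
      simp [pvDstep, hstar]
    · rw [if_neg (by tauto)]
      simp [pvDstep, not_not.mp hstar]
  · rw [if_neg hk, if_neg (by tauto)]
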